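-- pv_equiv track=rewrite | github.com/mapengsen/Feishu_Arxiv_agent | arxiv_paper.py | _expand_segment
-- ===== SOURCE A (Python) =====
-- def _expand_segment(segment: str):
--     """
--     Expand a segment that may contain `/` alternatives into full phrase variants.
--     """
--     tokens = [token for token in segment.strip().split() if token]
--     if not tokens:
--         return []
--
--     phrases = ['']
--     for token in tokens:
--         options = [opt.strip().lower() for opt in token.split('/') if opt.strip()]
--         if not options:
--             options = [token.lower()]
--         new_phrases = []
--         for base in phrases:
--             for option in options:
--                 if base:
--                     new_phrases.append('{} {}'.format(base, option))
--                 else: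
--                     new_phrases.append(option)
--         phrases = new_phrases
--
--     return [phrase for phrase in phrases if phrase]
-- ===== SOURCE B (Python) =====
-- def _expand_segment(segment: str):
--     """Expand a segment with `/` alternatives into phrase variants
--     (recursive Cartesian product over a precomputed option table)."""
--     tokens = segment.strip().split()
--     if not tokens:
--         return []
--     option_lists = [
--         [o.strip().lower() for o in t.split('/') if o.strip()] or [t.lower()]
--         for t in tokens
--     ]
--
--     def product(lists):
--         if not lists:
--             return [[]]
--         return [[x] + rest for x in lists[0] for rest in product(lists[1:])]
--
--     return [' '.join(c) for c in product(option_lists)]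
-- ===== Notes on version B (the rewrite author's own statement) =====
-- stated objective: alternative
-- what changed: A grows joined phrase strings incrementally token by token with an empty-base special case; B first builds the per-token option table, computes the Cartesian product by recursion on that table, and space-joins each combination once at the end.
import Mathlib
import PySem

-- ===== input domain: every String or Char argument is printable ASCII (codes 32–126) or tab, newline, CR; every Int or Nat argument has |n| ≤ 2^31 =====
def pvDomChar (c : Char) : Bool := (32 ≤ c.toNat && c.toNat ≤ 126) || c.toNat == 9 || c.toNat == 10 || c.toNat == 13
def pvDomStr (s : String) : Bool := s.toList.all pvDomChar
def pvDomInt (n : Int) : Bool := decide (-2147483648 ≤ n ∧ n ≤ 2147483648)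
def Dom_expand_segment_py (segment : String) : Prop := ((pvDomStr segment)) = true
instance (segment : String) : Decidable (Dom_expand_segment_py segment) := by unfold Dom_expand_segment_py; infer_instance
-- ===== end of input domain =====

-- B replaces A's incremental phrase accumulation by a per-token option table
-- and a recursive Cartesian product joined once at the end (objective: alternative).
-- token.split('/') is ported via PySem.Chars.splitOn (exact: the separator "/" is nonempty).

-- ===== PORT A =====
def expand_segment_py (segment : String) : List String :=
  let tokens := (PySem.Str.split₀ (PySem.Str.strip segment)).filter (fun t => t ≠ "")
  if tokens = [] then []
  else
    let phrases := tokens.foldl (fun phrases token =>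
      let options := ((PySem.Chars.splitOn token.toList ['/']).filter
          (fun o => PySem.Chars.strip o ≠ [])).map
          (fun o => String.ofList (PySem.Chars.lower (PySem.Chars.strip o)))
      let options := if options = [] then [PySem.Str.lower token] else options
      phrases.foldl (fun acc base =>
        options.foldl (fun acc option =>
          acc ++ [if base ≠ "" then base ++ " " ++ option else option]) acc) []) [""]
    phrases.filter (fun p => p ≠ "")

-- ===== PORT B =====
-- B-side helper: options of one token (the `or`-fallback comprehension)
def pvOptionsB (t : String) : List String :=
  let opts := ((PySem.Chars.splitOn t.toList ['/']).filter
      (fun o => PySem.Chars.strip o ≠ [])).map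
      (fun o => String.ofList (PySem.Chars.lower (PySem.Chars.strip o)))
  if opts = [] then [PySem.Str.lower t] else opts

-- B-side helper: the recursive Cartesian product `product(lists)`
def pvProduct : List (List String) → List (List String)
  | [] => [[]]
  | l :: ls => l.flatMap (fun x => (pvProduct ls).map (fun rest => x :: rest))

def expand_segment_py_alt (segment : String) : List String :=
  let tokens := PySem.Str.split₀ (PySem.Str.strip segment)
  if tokens = [] then []
  else (pvProduct (tokens.map pvOptionsB)).map (fun c => PySem.Str.join " " c)

-- ===== PRECONDITION & SPEC =====
def Spec_expand_segment_py (segment : String) (out : List String) : Prop := out = expand_segment_py_alt segment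
instance (segment : String) (out : List String) : Decidable (Spec_expand_segment_py segment out) := by unfold Spec_expand_segment_py; infer_instance

-- ===== CLAIM (what is proved, stated in full; the proofs are below) =====
def Claim_equal_expand_segment_py : Prop := ∀ (segment : String), Dom_expand_segment_py segment → Spec_expand_segment_py segment (expand_segment_py segment)

-- ===== LEMMAS AND PROOFS =====

-- words produced by str.split() are never empty
theorem split0_go_ne_nil (s : List Char) : ∀ (cur : List Char) (acc : List (List Char)),
    (∀ w ∈ acc, w ≠ []) →
    ∀ w ∈ PySem.Chars.split₀.go s cur acc, w ≠ [] := by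
  induction s with
  | nil =>
    intro cur acc hacc w hw
    simp only [PySem.Chars.split₀.go] at hw
    by_cases h : cur.isEmpty = true
    · rw [if_pos h, List.mem_reverse] at hw; exact hacc w hw
    · rw [if_neg h, List.mem_reverse, List.mem_cons] at hw
      rcases hw with h1 | h1
      · subst h1
        simp only [ne_eq, List.reverse_eq_nil_iff]
        intro hc; exact h (by simp [hc])
      · exact hacc w h1
  | cons c rest ih =>
    intro cur acc hacc w hw
    simp only [PySem.Chars.split₀.go] at hw
    by_cases hs : PySem.Chars.isspace c = true
    · rw [if_pos hs] at hw
      by_cases h : cur.isEmpty = true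
      · rw [if_pos h] at hw; exact ih [] acc hacc w hw
      · rw [if_neg h] at hw
        refine ih [] (cur.reverse :: acc) ?_ w hw
        intro v hv
        rcases List.mem_cons.mp hv with hv | hv
        · subst hv
          simp only [ne_eq, List.reverse_eq_nil_iff]
          intro hc; exact h (by simp [hc])
        · exact hacc v hv
    · rw [if_neg hs] at hw
      exact ih (c :: cur) acc hacc w hw

theorem split0_str_ne_empty (s : String) : ∀ w ∈ PySem.Str.split₀ s, w ≠ "" := by
  intro w hw
  simp only [PySem.Str.split₀, List.mem_map] at hw
  obtain ⟨cs, hcs, rfl⟩ := hw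
  have h1 : cs ≠ [] :=
    split0_go_ne_nil s.toList [] [] (by simp) cs
      (by simpa [PySem.Chars.split₀] using hcs)
  intro h
  apply h1
  have h2 := congrArg String.toList h
  simpa using h2

-- one step of A's phrase extension
def pvExtStep (b o : String) : String := if b ≠ "" then b ++ " " ++ o else o

def pvExt (b : String) (c : List String) : String := c.foldl pvExtStep b

theorem append_ne_empty (a b c : String) (ha : a ≠ "") : a ++ b ++ c ≠ "" := by
  intro h
  have h2 := congrArg String.toList h
  simp only [String.toList_append] at h2
  rcases List.append_eq_nil_iff.mp h2 with ⟨h3, _⟩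
  rcases List.append_eq_nil_iff.mp h3 with ⟨h4, _⟩
  exact ha (String.toList_eq_nil_iff.mp h4)

-- extending a nonempty base is exactly a space-join with the base in front
theorem pvExt_eq_join (c : List String) : ∀ b : String, b ≠ "" →
    pvExt b c = PySem.Str.join " " (b :: c) := by
  induction c with
  | nil =>
    intro b _
    rw [← String.toList_inj]
    simp [pvExt, PySem.Str.toList_join, PySem.Chars.join_singleton]
  | cons o c ih =>
    intro b hb
    have h1 : pvExt b (o :: c) = pvExt (b ++ " " ++ o) c := by
      simp [pvExt, pvExtStep, hb]
    rw [h1, ih _ (append_ne_empty b " " o hb), ← String.toList_inj]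
    simp only [PySem.Str.toList_join, List.map_cons]
    cases c with
    | nil =>
      simp [PySem.Chars.join_singleton, PySem.Chars.join_cons_cons,
        String.toList_append, List.append_assoc]
    | cons y ys =>
      simp [PySem.Chars.join_cons_cons, String.toList_append, List.append_assoc]

theorem pvExt_empty_eq_join (o : String) (c : List String) (ho : o ≠ "") :
    pvExt "" (o :: c) = PySem.Str.join " " (o :: c) := by
  have h1 : pvExt "" (o :: c) = pvExt o c := by simp [pvExt, pvExtStep]
  rw [h1, pvExt_eq_join c o ho]

-- A's whole token loop is B's Cartesian product, extended over each base phrase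
theorem loopA_eq_product (ls : List (List String)) : ∀ ps : List String,
    ls.foldl (fun phrases opts =>
        phrases.foldl (fun acc base =>
          opts.foldl (fun acc option => acc ++ [pvExtStep base option]) acc) []) ps
    = ps.flatMap (fun b => (pvProduct ls).map (pvExt b)) := by
  induction ls with
  | nil =>
    intro ps
    simp [pvProduct, pvExt]
  | cons opts rest ih =>
    intro ps
    simp only [List.foldl_cons]
    rw [show (ps.foldl (fun acc base =>
          opts.foldl (fun acc option => acc ++ [pvExtStep base option]) acc) [])
        = ps.flatMap (fun b => opts.map (pvExtStep b)) by
      simp only [PySem.List.foldl_append_singleton_eq_map]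
      rw [PySem.List.foldl_append_eq_flatMap]; simp]
    rw [ih]
    simp only [List.flatMap_assoc, pvProduct]
    refine List.flatMap_congr ?_
    intro b _
    rw [List.flatMap_map, List.map_flatMap]
    refine List.flatMap_congr ?_
    intro o _
    rw [List.map_map]
    refine List.map_congr_left ?_
    intro combo _
    show pvExt (pvExtStep b o) combo = pvExt b (o :: combo)
    simp [pvExt]

theorem mem_pvProduct_cons (l : List String) (ls : List (List String)) (combo : List String)
    (h : combo ∈ pvProduct (l :: ls)) :
    ∃ o c, o ∈ l ∧ combo = o :: c := by
  simp only [pvProduct, List.mem_flatMap, List.mem_map] at h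
  obtain ⟨o, ho, c, _, rfl⟩ := h
  exact ⟨o, c, ho, rfl⟩

theorem pvOptionsB_ne_empty (t : String) (ht : t ≠ "") :
    ∀ o ∈ pvOptionsB t, o ≠ "" := by
  intro o ho
  simp only [pvOptionsB] at ho
  split at ho
  · simp only [List.mem_singleton] at ho
    subst ho
    intro h
    apply ht
    have h2 := congrArg String.toList h
    rw [PySem.Str.toList_lower] at h2
    rw [← String.toList_eq_nil_iff]
    simpa [PySem.Chars.lower] using h2
  · simp only [List.mem_map, List.mem_filter] at ho
    obtain ⟨x, ⟨_, hx⟩, rfl⟩ := ho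
    intro h
    have h2 := congrArg String.toList h
    have hx' : PySem.Chars.strip x ≠ [] := by simpa using hx
    apply hx'
    simpa [PySem.Chars.lower] using h2

theorem join_ne_empty (o : String) (c : List String) (ho : o ≠ "") :
    PySem.Str.join " " (o :: c) ≠ "" := by
  intro h
  have h2 := congrArg String.toList h
  rw [PySem.Str.toList_join] at h2
  apply ho
  rw [← String.toList_eq_nil_iff]
  cases c with
  | nil => simpa [PySem.Chars.join_singleton] using h2
  | cons y ys =>
    rw [List.map_cons, List.map_cons, PySem.Chars.join_cons_cons] at h2
    simp only [String.toList_eq_nil_iff] at h2 ⊢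
    rcases List.append_eq_nil_iff.mp h2 with ⟨h3, _⟩
    rcases List.append_eq_nil_iff.mp h3 with ⟨h4, _⟩
    exact String.toList_eq_nil_iff.mp h4

-- ===== VERDICT (by name: the statement is the Claim_ definition above) =====
theorem expand_segment_py_spec : Claim_equal_expand_segment_py := by
  intro segment _
  unfold Spec_expand_segment_py expand_segment_py expand_segment_py_alt
  have hne := split0_str_ne_empty (PySem.Str.strip segment)
  set ts := PySem.Str.split₀ (PySem.Str.strip segment) with hts
  have hfilt : ts.filter (fun t => t ≠ "") = ts :=
    List.filter_eq_self.mpr (fun t h => by simpa using hne t h)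
  rw [hfilt]
  by_cases h0 : ts = []
  · simp [h0]
  · simp only [if_neg h0]
    have hloop : (ts.foldl (fun phrases token =>
        let options := ((PySem.Chars.splitOn token.toList ['/']).filter
            (fun o => PySem.Chars.strip o ≠ [])).map
            (fun o => String.ofList (PySem.Chars.lower (PySem.Chars.strip o)))
        let options := if options = [] then [PySem.Str.lower token] else options
        phrases.foldl (fun acc base =>
          options.foldl (fun acc option =>
            acc ++ [if base ≠ "" then base ++ " " ++ option else option]) acc) []) [""])
        = (ts.map pvOptionsB).foldl (fun phrases opts =>
            phrases.foldl (fun acc base =>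
              opts.foldl (fun acc option => acc ++ [pvExtStep base option]) acc) []) [""] := by
      rw [List.foldl_map]
      rfl
    rw [hloop, loopA_eq_product]
    simp only [List.flatMap_cons, List.flatMap_nil, List.append_nil]
    obtain ⟨t, rest, hts'⟩ := List.exists_cons_of_ne_nil h0
    have hhead : ∀ combo ∈ pvProduct (ts.map pvOptionsB),
        pvExt "" combo = PySem.Str.join " " combo ∧ PySem.Str.join " " combo ≠ "" := by
      intro combo hc
      rw [hts', List.map_cons] at hc
      obtain ⟨o, c, ho, rfl⟩ := mem_pvProduct_cons _ _ _ hc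
      have hone : o ≠ "" := pvOptionsB_ne_empty t (hne t (by rw [hts']; simp)) o ho
      exact ⟨pvExt_empty_eq_join o c hone, join_ne_empty o c hone⟩
    rw [List.map_congr_left (fun combo hc => (hhead combo hc).1)]
    rw [List.filter_eq_self.mpr]
    intro p hp
    simp only [List.mem_map] at hp
    obtain ⟨combo, hc, rfl⟩ := hp
    simpa using (hhead combo hc).2
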